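-- pv_equiv track=rewrite | github.com/MrBrantCode/unitest_baseline | mut_generate/mist_train_taco/taco_6724/solution.py | longest_common_pattern_length
-- ===== SOURCE A (Python) =====
-- def longest_common_pattern_length(A: str, B: str) -> int:
--     # Convert strings to lists of characters
--     list_A = list(A)
--     list_B = list(B)
--
--     # Create a set of unique characters from A
--     unique_chars_A = set(list_A)
--
--     # Initialize the count of common characters
--     common_count = 0
--
--     # Iterate over each unique character in A
--     for char in unique_chars_A:
--         # Count the occurrences of the character in both A and B
--         count_in_A = list_A.count(char)
--         count_in_B = list_B.count(char)
--
--         # Add the minimum of the two counts to the common count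
--         common_count += min(count_in_A, count_in_B)
--
--     return common_count
-- ===== SOURCE B (Python) =====
-- def longest_common_pattern_length(A: str, B: str) -> int:
--     sa = sorted(A)
--     sb = sorted(B)
--     i = j = 0
--     count = 0
--     while i < len(sa) and j < len(sb):
--         if sa[i] < sb[j]:
--             i += 1
--         elif sa[i] > sb[j]:
--             j += 1
--         else:
--             count += 1
--             i += 1
--             j += 1
--     return count
-- ===== Notes on version B (the rewrite author's own statement) =====
-- stated objective: alternative
-- what changed: Replaced the per-unique-character frequency scan (sum of min counts over set(A)) by sorting both strings and counting matched pairs with a two-pointer merge.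
import Mathlib
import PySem

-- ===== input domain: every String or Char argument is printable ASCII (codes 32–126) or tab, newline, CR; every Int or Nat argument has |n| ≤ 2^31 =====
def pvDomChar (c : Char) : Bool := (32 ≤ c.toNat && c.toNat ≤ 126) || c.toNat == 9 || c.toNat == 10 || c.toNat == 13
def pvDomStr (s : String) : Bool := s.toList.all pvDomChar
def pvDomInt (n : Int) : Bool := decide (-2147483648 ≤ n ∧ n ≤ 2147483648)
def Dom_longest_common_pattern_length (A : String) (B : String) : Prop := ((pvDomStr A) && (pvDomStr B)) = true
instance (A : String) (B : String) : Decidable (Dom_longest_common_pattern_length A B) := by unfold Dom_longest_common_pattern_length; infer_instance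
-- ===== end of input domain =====

-- B replaces A's per-unique-character frequency scans by sorting both strings and
-- counting matched pairs with a two-pointer merge (alternative algorithm, same result).

-- ===== PORT A =====
-- A: for each char of set(A), add min(A.count(char), B.count(char)). Summing over
-- PySem.Set.ofList is sound: addition is commutative, so set iteration order is irrelevant.
def longest_common_pattern_length (A : String) (B : String) : Int :=
  let list_A := A.toList
  let list_B := B.toList
  let unique_chars_A : PySem.Set Char := PySem.Set.ofList list_A
  unique_chars_A.foldl
    (fun common_count ch =>
      common_count + min (PySem.List.count list_A ch : Int) (PySem.List.count list_B ch : Int))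
    0

-- ===== PORT B =====
-- the two-pointer while-loop of Source B, as structural recursion on the two sorted lists
def pvMergeCount : List Char → List Char → Int
  | [], _ => 0
  | _ :: _, [] => 0
  | a :: sa, b :: sb =>
    if a < b then pvMergeCount sa (b :: sb)
    else if b < a then pvMergeCount (a :: sa) sb
    else 1 + pvMergeCount sa sb

def longest_common_pattern_length_alt (A : String) (B : String) : Int :=
  let sa := PySem.List.sorted A.toList (fun c => c) false
  let sb := PySem.List.sorted B.toList (fun c => c) false
  pvMergeCount sa sb

-- ===== PRECONDITION & SPEC =====
def Spec_longest_common_pattern_length (A : String) (B : String) (out : Int) : Prop := out = longest_common_pattern_length_alt A B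
instance (A : String) (B : String) (out : Int) : Decidable (Spec_longest_common_pattern_length A B out) := by unfold Spec_longest_common_pattern_length; infer_instance

-- ===== CLAIM (what is proved, stated in full; the proofs are below) =====
def Claim_equal_longest_common_pattern_length : Prop := ∀ (A : String) (B : String), Dom_longest_common_pattern_length A B → Spec_longest_common_pattern_length A B (longest_common_pattern_length A B)

-- ===== LEMMAS AND PROOFS =====

-- A's sum of per-character minima is the cardinality of the multiset intersection.
theorem pvSumMin_eq_interCard (xs ys : List Char) :
    (PySem.Set.ofList xs).foldl
      (fun acc ch => acc + min (PySem.List.count xs ch : Int) (PySem.List.count ys ch : Int)) 0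
    = (((xs : Multiset Char) ∩ (ys : Multiset Char)).card : Int) := by
  rw [PySem.List.foldl_add, zero_add]
  have hnd : (PySem.Set.ofList xs).Nodup := PySem.Set.nodup_ofList xs
  have hfin : (PySem.Set.ofList xs : List Char).toFinset = xs.toFinset := by
    ext c
    simp [PySem.Set.mem_ofList]
  rw [← List.sum_toFinset _ hnd, hfin]
  have hsum : ∀ c : Char,
      min (PySem.List.count xs c : Int) (PySem.List.count ys c : Int)
      = ((Multiset.count c ((xs : Multiset Char) ∩ ys)) : Int) := by
    intro c
    rw [Multiset.count_inter, Multiset.coe_count, Multiset.coe_count,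
        PySem.List.count_eq, PySem.List.count_eq]
    exact_mod_cast rfl
  calc ∑ c ∈ xs.toFinset,
          min (PySem.List.count xs c : Int) (PySem.List.count ys c : Int)
      = ∑ c ∈ xs.toFinset, ((Multiset.count c ((xs : Multiset Char) ∩ ys)) : Int) := by
        exact Finset.sum_congr rfl (fun c _ => hsum c)
    _ = ((∑ c ∈ xs.toFinset, Multiset.count c ((xs : Multiset Char) ∩ ys) : Nat) : Int) := by
        push_cast; ring
    _ = (((xs : Multiset Char) ∩ (ys : Multiset Char)).card : Int) := by
        congr 1
        rw [← Multiset.toFinset_sum_count_eq ((xs : Multiset Char) ∩ ys)]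
        apply (Finset.sum_subset _ _).symm
        · intro c hc
          have : c ∈ (xs : Multiset Char) ∩ ys := Multiset.mem_toFinset.mp hc
          have : c ∈ (xs : Multiset Char) :=
            Multiset.mem_of_le Multiset.inter_le_left this
          simpa [List.mem_toFinset] using this
        · intro c _ hc
          exact Multiset.count_eq_zero.mpr (fun h => hc (Multiset.mem_toFinset.mpr h))

-- B's merge over two ≤-sorted lists counts the cardinality of the multiset intersection.
theorem pvMergeCount_eq_interCard (sa sb : List Char) :
    sa.Pairwise (· ≤ ·) → sb.Pairwise (· ≤ ·) →
    pvMergeCount sa sb = (((sa : Multiset Char) ∩ (sb : Multiset Char)).card : Int) := by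
  fun_induction pvMergeCount sa sb with
  | case1 sb => intro _ _; simp
  | case2 a sa => intro _ _; simp
  | case3 a sa b sb hab ih =>
    intro h1 h2
    have hnb : a ∉ ((b :: sb : List Char) : Multiset Char) := by
      rw [Multiset.mem_coe]
      intro hmem
      rcases List.mem_cons.mp hmem with h | h
      · exact absurd h (ne_of_lt hab)
      · exact absurd (List.rel_of_pairwise_cons h2 h) (not_le_of_gt hab)
    rw [← Multiset.cons_coe, Multiset.cons_inter_of_neg _ hnb]
    exact ih h1.of_cons h2
  | case4 a sa b sb hab hba ih =>
    intro h1 h2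
    have hnb : b ∉ ((a :: sa : List Char) : Multiset Char) := by
      rw [Multiset.mem_coe]
      intro hmem
      rcases List.mem_cons.mp hmem with h | h
      · exact absurd h (ne_of_lt hba)
      · exact absurd (List.rel_of_pairwise_cons h1 h) (not_le_of_gt hba)
    rw [Multiset.inter_comm, ← Multiset.cons_coe, Multiset.cons_inter_of_neg _ hnb,
        Multiset.inter_comm]
    exact ih h1 h2.of_cons
  | case5 a sa b sb hab hba ih =>
    intro h1 h2
    have heq : a = b := le_antisymm (not_lt.mp hba) (not_lt.mp hab)
    subst heq
    rw [← Multiset.cons_coe, ← Multiset.cons_coe,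
        Multiset.cons_inter_of_pos _ (by simp), Multiset.erase_cons_head]
    rw [Multiset.card_cons, ih h1.of_cons h2.of_cons]
    push_cast; ring

-- ===== VERDICT (by name: the statement is the Claim_ definition above) =====
theorem longest_common_pattern_length_spec : Claim_equal_longest_common_pattern_length := by
  intro A B _
  unfold Spec_longest_common_pattern_length
  unfold longest_common_pattern_length longest_common_pattern_length_alt
  rw [pvSumMin_eq_interCard]
  rw [pvMergeCount_eq_interCard _ _
      (PySem.List.sorted_pairwise A.toList (fun c => c))
      (PySem.List.sorted_pairwise B.toList (fun c => c))]
  congr 1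
  rw [Multiset.coe_eq_coe.mpr (PySem.List.sorted_perm A.toList (fun c => c) false),
      Multiset.coe_eq_coe.mpr (PySem.List.sorted_perm B.toList (fun c => c) false)]
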